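-- pv_equiv track=rewrite | github.com/FurkanAkkamis25/cryptograph_encryption_algorithm | mod64.py | Anahtar_Uret
-- ===== SOURCE A (Python) =====
-- def Anahtar_Uret(parola):
--     """
--     İster 1: Paroladan 8 adet tur anahtarı üretir.
--     """
--     parola = parola.ljust(8)[:8] # 64-bite tamamla
--     ana_anahtar = int.from_bytes(parola.encode('utf-8'), 'big')
--
--     anahtarlar = []
--     temp_key = ana_anahtar
--     for i in range(8):
--         tur_anahtari = temp_key & 0xFFFFFFFF
--         anahtarlar.append(tur_anahtari)
--         # Anahtarı karıştır (Key Schedule)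
--         temp_key = ((temp_key << 7) | (temp_key >> (64 - 7))) & ((1 << 64) - 1)
--     return anahtarlar
-- ===== SOURCE B (Python) =====
-- def Anahtar_Uret(parola):
--     """8 tur anahtari: closed-form rotation instead of an iteratively updated temp_key."""
--     parola = parola.ljust(8)[:8]
--     seed = int.from_bytes(parola.encode('utf-8'), 'big')
--     mask64 = (1 << 64) - 1
--     # one shuffle exactly as A's first shift-then-mask step; afterwards pure 64-bit rotation
--     t1 = ((seed << 7) | (seed >> 57)) & mask64
--     return [seed & 0xFFFFFFFF] + [
--         (((t1 << (7 * i)) | (t1 >> (64 - 7 * i))) & mask64) & 0xFFFFFFFF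
--         for i in range(7)
--     ]
-- ===== Notes on version B (the rewrite author's own statement) =====
-- stated objective: alternative
-- what changed: B replaces the loop that iteratively rotates temp_key with a closed-form per-index 64-bit rotation of the once-shuffled seed, emitting each round key independently.
import Mathlib
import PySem

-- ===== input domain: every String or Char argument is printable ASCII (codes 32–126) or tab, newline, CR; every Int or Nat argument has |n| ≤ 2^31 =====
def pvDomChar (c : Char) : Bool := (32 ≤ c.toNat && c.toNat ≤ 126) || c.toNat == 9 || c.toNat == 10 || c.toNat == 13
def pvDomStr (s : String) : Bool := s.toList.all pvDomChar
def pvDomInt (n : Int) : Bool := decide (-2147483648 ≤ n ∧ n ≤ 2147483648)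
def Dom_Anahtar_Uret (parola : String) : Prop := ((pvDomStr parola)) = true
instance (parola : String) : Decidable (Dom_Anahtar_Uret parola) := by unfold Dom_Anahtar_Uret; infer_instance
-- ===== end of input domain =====

-- B derives each round key by a closed-form rotation of the once-shuffled seed instead of
-- iteratively updating temp_key; same return value.

-- ===== PORT A =====
-- 'parola.ljust(8)[:8]' then 'int.from_bytes(parola.encode("utf-8"), "big")';
-- encode is ported as one byte per char (exact on the ASCII domain Dom_).
def pySeed (parola : String) : Nat :=
  let chars := (parola.toList ++ List.replicate (8 - parola.toList.length) ' ').take 8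
  chars.foldl (fun a c => a * 256 + c.toNat) 0

-- A's key-schedule line: temp_key = ((temp_key << 7) | (temp_key >> (64 - 7))) & ((1 << 64) - 1)
def shuffle (temp_key : Nat) : Nat :=
  ((temp_key <<< 7) ||| (temp_key >>> (64 - 7))) &&& ((1 <<< 64) - 1)

def Anahtar_Uret (parola : String) : List Int :=
  let ana_anahtar := pySeed parola
  let r := (List.range 8).foldl
    (fun (st : List Int × Nat) _ =>
      (st.1 ++ [Int.ofNat (st.2 &&& 0xFFFFFFFF)], shuffle st.2))
    ([], ana_anahtar)
  r.1

-- ===== PORT B =====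
def rotl64 (x n : Nat) : Nat :=
  ((x <<< n) ||| (x >>> (64 - n))) &&& ((1 <<< 64) - 1)

def Anahtar_Uret_alt (parola : String) : List Int :=
  let seed := pySeed parola
  let t1 := ((seed <<< 7) ||| (seed >>> 57)) &&& ((1 <<< 64) - 1)
  Int.ofNat (seed &&& 0xFFFFFFFF) ::
    (List.range 7).map (fun i => Int.ofNat (rotl64 t1 (7 * i) &&& 0xFFFFFFFF))

-- ===== PRECONDITION & SPEC =====
def Spec_Anahtar_Uret (parola : String) (out : List Int) : Prop := out = Anahtar_Uret_alt parola
instance (parola : String) (out : List Int) : Decidable (Spec_Anahtar_Uret parola out) := by unfold Spec_Anahtar_Uret; infer_instance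

-- ===== CLAIM (what is proved, stated in full; the proofs are below) =====
def Claim_equal_Anahtar_Uret : Prop := ∀ (parola : String), Dom_Anahtar_Uret parola → Spec_Anahtar_Uret parola (Anahtar_Uret parola)

-- ===== LEMMAS AND PROOFS =====

lemma rotl64_testBit (x n i : Nat) :
    (rotl64 x n).testBit i =
      (decide (i < 64) && ((decide (n ≤ i) && x.testBit (i - n)) || x.testBit (64 - n + i))) := by
  unfold rotl64
  simp only [Nat.testBit_and, Nat.testBit_or, Nat.testBit_shiftLeft, Nat.testBit_shiftRight]
  rw [show (1 <<< 64 - 1 : Nat) = 2^64 - 1 by norm_num [Nat.shiftLeft_eq],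
    Nat.testBit_two_pow_sub_one]
  rw [Bool.and_comm]

lemma testBit_hi (x i : Nat) (hx : x < 2 ^ 64) (hi : 64 ≤ i) : x.testBit i = false :=
  Nat.testBit_lt_two_pow (lt_of_lt_of_le hx (Nat.pow_le_pow_right (by norm_num) hi))

lemma rotl64_lt (x n : Nat) : rotl64 x n < 2 ^ 64 := by
  unfold rotl64
  have h : (1 <<< 64 - 1 : Nat) = 2 ^ 64 - 1 := by norm_num [Nat.shiftLeft_eq]
  rw [h]
  have := Nat.and_le_right (n := (x <<< n) ||| (x >>> (64 - n))) (m := 2 ^ 64 - 1)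
  omega

lemma rotl64_zero (x : Nat) (hx : x < 2 ^ 64) : rotl64 x 0 = x := by
  unfold rotl64
  rw [Nat.shiftLeft_zero, Nat.sub_zero, Nat.shiftRight_eq_div_pow,
    Nat.div_eq_of_lt hx, Nat.or_zero,
    show (1 <<< 64 - 1 : Nat) = 2^64 - 1 by norm_num [Nat.shiftLeft_eq],
    Nat.and_two_pow_sub_one_eq_mod, Nat.mod_eq_of_lt hx]

lemma rotl64_comp (x r : Nat) (hx : x < 2 ^ 64) (hr : r ≤ 42) :
    rotl64 (rotl64 x r) 7 = rotl64 x (r + 7) := by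
  apply Nat.eq_of_testBit_eq
  intro i
  simp only [rotl64_testBit]
  by_cases hi : i < 64
  · by_cases h7 : 7 ≤ i
    · by_cases hc : r + 7 ≤ i
      · have d1 : i - 7 < 64 := by omega
        have d2 : r ≤ i - 7 := by omega
        have d3 : ¬ (57 + i < 64) := by omega
        have f1 : x.testBit (64 - r + (i - 7)) = false := testBit_hi x _ hx (by omega)
        have f2 : x.testBit (57 - r + i) = false := testBit_hi x _ hx (by omega)
        have e1 : i - 7 - r = i - (r + 7) := by omega
        simp [hi, h7, hc, d1, d2, d3, f1, f2, e1]
      · have d1 : i - 7 < 64 := by omega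
        have d2 : ¬ (r ≤ i - 7) := by omega
        have d3 : ¬ (57 + i < 64) := by omega
        have e1 : 64 - r + (i - 7) = 57 - r + i := by omega
        simp [hi, h7, hc, d1, d2, d3, e1]
    · by_cases hc : r + 7 ≤ i
      · omega
      · have d1 : 57 + i < 64 := by omega
        have d2 : r ≤ 57 + i := by omega
        have f1 : x.testBit (64 - r + (57 + i)) = false := testBit_hi x _ hx (by omega)
        have e1 : 57 + i - r = 57 - r + i := by omega
        simp [hi, h7, hc, d1, d2, f1, e1]
  · simp [hi]

lemma shuffle_eq_rotl (y : Nat) : shuffle y = rotl64 y 7 := rfl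

-- ===== VERDICT (by name: the statement is the Claim_ definition above) =====
theorem Anahtar_Uret_spec : Claim_equal_Anahtar_Uret := by
  intro parola _
  show Anahtar_Uret parola = Anahtar_Uret_alt parola
  unfold Anahtar_Uret Anahtar_Uret_alt
  set t := pySeed parola with ht
  have hb : ((t <<< 7) ||| (t >>> 57)) &&& ((1 <<< 64) - 1) = rotl64 t 7 := rfl
  have hlt : rotl64 t 7 < 2 ^ 64 := rotl64_lt t 7
  have h0 : rotl64 (rotl64 t 7) 0 = rotl64 t 7 := rotl64_zero _ hlt
  have h7 : ∀ r : Nat, r ≤ 42 → rotl64 (rotl64 (rotl64 t 7) r) 7 = rotl64 (rotl64 t 7) (r + 7) :=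
    fun r hr => rotl64_comp _ r hlt hr
  simp only [List.range_succ, List.range_zero, List.foldl_cons,
    List.foldl_nil, List.map_cons, List.map_nil, List.nil_append,
    List.cons_append, hb, shuffle_eq_rotl]
  norm_num
  rw [h0, h7 7 (by norm_num), h7 14 (by norm_num), h7 21 (by norm_num),
    h7 28 (by norm_num), h7 35 (by norm_num)]
  norm_num
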